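-- pv_equiv track=rewrite | github.com/bkrmalick/uni | Data Strucutres (Python + Java)/Recursion Slides/Q1.py | sumConsR
-- ===== SOURCE A (Python) =====
-- def sumConsR(A,s,e):
--     if(e-s==0):
--         return A[e]
--     elif(e-s==1):
--         return A[e]+A[s]
--     else:
--         m=int((s+e)/2)
--
--         return sumConsR(A,s,m) + sumConsR(A,m,e)
-- ===== SOURCE B (Python) =====
-- # Closed form: the recursion double-counts every interior index once, so the
-- # answer is A[s] + A[e] + 2*sum of the strictly interior elements.
-- def sumConsR(A, s, e):
--     if e == s:
--         return A[e]
--     return A[s] + A[e] + 2 * sum(A[i] for i in range(s + 1, e))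
-- ===== Notes on version B (the rewrite author's own statement) =====
-- stated objective: simpler
-- what changed: Replaced the divide-and-conquer recursion by the closed form A[s]+A[e]+2*sum(A[s+1:e]) that it computes (interior indices are double-counted).
import Mathlib
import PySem

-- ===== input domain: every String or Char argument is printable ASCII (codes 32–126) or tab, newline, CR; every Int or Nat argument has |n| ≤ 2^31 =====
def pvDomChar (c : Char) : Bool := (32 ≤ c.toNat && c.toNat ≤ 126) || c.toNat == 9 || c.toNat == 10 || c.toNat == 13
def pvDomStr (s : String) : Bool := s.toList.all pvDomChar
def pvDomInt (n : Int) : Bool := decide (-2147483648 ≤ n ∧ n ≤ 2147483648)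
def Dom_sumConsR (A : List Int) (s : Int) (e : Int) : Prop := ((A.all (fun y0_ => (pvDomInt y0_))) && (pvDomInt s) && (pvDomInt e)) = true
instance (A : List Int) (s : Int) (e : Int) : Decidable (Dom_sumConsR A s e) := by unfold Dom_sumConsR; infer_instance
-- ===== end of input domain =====

-- B replaces the divide-and-conquer recursion by the closed form it computes
-- (endpoints once, interior elements twice); objective: simpler, same cost.

-- ===== PORT A =====
-- Fuel makes the Python recursion total in Lean; (e-s).toNat+1 fuel is always
-- enough on Pre_ (each recursive call shrinks e-s by at least 1).
-- m = int((s+e)/2) is truncation toward zero = Int.tdiv, exact on Dom since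
-- |s+e| ≤ 2^32 < 2^53.
def sumConsRFuel : Nat → List Int → Int → Int → Int
  | 0, _, _, _ => 0
  | fuel+1, A, s, e =>
    if e - s = 0 then PySem.List.pyGetD A e 0
    else if e - s = 1 then PySem.List.pyGetD A e 0 + PySem.List.pyGetD A s 0
    else
      let m := Int.tdiv (s + e) 2
      sumConsRFuel fuel A s m + sumConsRFuel fuel A m e

def sumConsR (A : List Int) (s : Int) (e : Int) : Int :=
  sumConsRFuel ((e - s).toNat + 1) A s e

-- ===== PORT B =====
def sumConsR_alt (A : List Int) (s : Int) (e : Int) : Int :=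
  if e = s then PySem.List.pyGetD A e 0
  else PySem.List.pyGetD A s 0 + PySem.List.pyGetD A e 0 +
    2 * (PySem.List.pyRange (s + 1) e 1).foldl
          (fun acc i => acc + PySem.List.pyGetD A i 0) 0

-- ===== PRECONDITION & SPEC =====
-- Pre_ excludes e < s (infinite recursion, RecursionError) and indices outside
-- [-len, len): A raises IndexError there (it reads A[i] for every i in [s,e]).
def Pre_sumConsR (A : List Int) (s : Int) (e : Int) : Prop :=
  s ≤ e ∧ -(A.length : Int) ≤ s ∧ e < (A.length : Int)
instance (A : List Int) (s : Int) (e : Int) : Decidable (Pre_sumConsR A s e) := by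
  unfold Pre_sumConsR; infer_instance
def pvWitness_sumConsR : List Int × Int × Int := ([3, 1, 4, 1, 5], 0, 4)

def Spec_sumConsR (A : List Int) (s : Int) (e : Int) (out : Int) : Prop := out = sumConsR_alt A s e
instance (A : List Int) (s : Int) (e : Int) (out : Int) : Decidable (Spec_sumConsR A s e out) := by unfold Spec_sumConsR; infer_instance

-- ===== CLAIM (what is proved, stated in full; the proofs are below) =====
def Claim_equal_sumConsR : Prop := ∀ (A : List Int) (s : Int) (e : Int), Dom_sumConsR A s e → Pre_sumConsR A s e → Spec_sumConsR A s e (sumConsR A s e)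

-- ===== LEMMAS AND PROOFS =====

-- The interior sum, as B's fold computes it.
def interiorSum (A : List Int) (a b : Int) : Int :=
  ((PySem.List.pyRange a b 1).map (fun i => PySem.List.pyGetD A i 0)).sum

lemma interiorSum_split (A : List Int) (a m b : Int) (h1 : a ≤ m) (h2 : m < b) :
    interiorSum A a b = interiorSum A a m + PySem.List.pyGetD A m 0 + interiorSum A (m+1) b := by
  unfold interiorSum
  rw [PySem.List.pyRange_one_append a m b h1 (le_of_lt h2),
      PySem.List.pyRange_one_cons h2]
  simp [add_assoc]

lemma interiorSum_empty (A : List Int) (a b : Int) (h : b ≤ a) :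
    interiorSum A a b = 0 := by
  unfold interiorSum
  rw [PySem.List.pyRange_one_eq_nil h]
  simp

lemma foldl_sum (g : Int → Int) (l : List Int) (a : Int) :
    l.foldl (fun acc x => acc + g x) a = a + (l.map g).sum := by
  induction l generalizing a with
  | nil => simp
  | cons x xs ih => simp [ih]; ring

lemma alt_closed (A : List Int) (s e : Int) (h : s < e) :
    sumConsR_alt A s e =
      PySem.List.pyGetD A s 0 + PySem.List.pyGetD A e 0 + 2 * interiorSum A (s+1) e := by
  unfold sumConsR_alt
  rw [if_neg (by omega), foldl_sum]
  unfold interiorSum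
  ring

lemma tdiv_between (s e : Int) (h : s + 2 ≤ e) :
    s + 1 ≤ Int.tdiv (s + e) 2 ∧ Int.tdiv (s + e) 2 ≤ e - 1 := by
  rcases le_or_gt 0 (s + e) with hx | hx
  · rw [Int.tdiv_eq_ediv_of_nonneg hx]; omega
  · have hneg : Int.tdiv (s + e) 2 = -((-(s + e)) / 2) := by
      rw [← Int.tdiv_eq_ediv_of_nonneg (by omega : (0:Int) ≤ -(s + e)), Int.neg_tdiv, neg_neg]
    omega

lemma fuel_eq (fuel : Nat) : ∀ (A : List Int) (s e : Int), s ≤ e →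
    (e - s).toNat < fuel → sumConsRFuel fuel A s e = sumConsR_alt A s e := by
  induction fuel with
  | zero => intro A s e _ h; omega
  | succ n ih =>
    intro A s e hse hfuel
    show (if e - s = 0 then PySem.List.pyGetD A e 0
      else if e - s = 1 then PySem.List.pyGetD A e 0 + PySem.List.pyGetD A s 0
      else
        let m := Int.tdiv (s + e) 2
        sumConsRFuel n A s m + sumConsRFuel n A m e) = _
    by_cases h0 : e - s = 0
    · rw [if_pos h0]
      unfold sumConsR_alt
      rw [if_pos (by omega)]
    · rw [if_neg h0]
      by_cases h1 : e - s = 1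
      · rw [if_pos h1]
        rw [alt_closed A s e (by omega), interiorSum_empty A (s+1) e (by omega)]
        ring
      · rw [if_neg h1]
        have h2 : s + 2 ≤ e := by omega
        obtain ⟨hm1, hm2⟩ := tdiv_between s e h2
        set m := Int.tdiv (s + e) 2 with hm
        show sumConsRFuel n A s m + sumConsRFuel n A m e = sumConsR_alt A s e
        rw [ih A s m (by omega) (by omega), ih A m e (by omega) (by omega)]
        rw [alt_closed A s m (by omega), alt_closed A m e (by omega),
            alt_closed A s e (by omega)]
        rw [interiorSum_split A (s+1) m e (by omega) (by omega)]
        ring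

-- ===== VERDICT (by name: the statement is the Claim_ definition above) =====
theorem sumConsR_spec : Claim_equal_sumConsR := by
  intro A s e _ hpre
  unfold Spec_sumConsR sumConsR
  exact fuel_eq _ A s e hpre.1 (by omega)
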